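-- pv_equiv track=rewrite | github.com/tommasotode/oii | terry2023/newlines.py | max_group
-- ===== SOURCE A (Python) =====
-- def max_group(arr):
-- 	curr = 0
-- 	groups = []
-- 	for i in arr:
-- 		if i == -1:
-- 			groups.append(curr)
-- 			curr = 0
-- 		else:
-- 			curr = curr + i + 1
-- 	groups.append(curr)
--
-- 	return max(groups) -1
-- ===== SOURCE B (Python) =====
-- def max_group(arr):
--     if -1 in arr:
--         k = arr.index(-1)
--         return max(sum(arr[:k]) + k - 1, max_group(arr[k + 1:]))
--     return sum(arr) + len(arr) - 1
-- ===== Notes on version B (the rewrite author's own statement) =====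
-- stated objective: alternative
-- what changed: B replaces A's single-pass accumulator-with-reset loop by a divide-and-conquer recursion: it locates the first -1 with index(), scores the prefix group in closed form as sum(prefix)+len(prefix)-1, and recurses on the suffix after the separator; no running accumulator or groups list exists.
import Mathlib
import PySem

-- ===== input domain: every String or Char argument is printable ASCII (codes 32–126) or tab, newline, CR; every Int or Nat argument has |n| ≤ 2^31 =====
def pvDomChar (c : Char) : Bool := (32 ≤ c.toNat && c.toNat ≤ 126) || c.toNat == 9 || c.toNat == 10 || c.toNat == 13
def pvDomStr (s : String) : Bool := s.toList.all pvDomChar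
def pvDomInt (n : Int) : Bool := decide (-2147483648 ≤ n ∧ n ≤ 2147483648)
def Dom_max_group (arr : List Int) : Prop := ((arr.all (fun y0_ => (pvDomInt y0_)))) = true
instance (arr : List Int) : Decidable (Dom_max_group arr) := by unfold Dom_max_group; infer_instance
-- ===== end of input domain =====

-- B replaces A's accumulator-with-reset loop by a divide-and-conquer recursion splitting at the first -1 (objective: alternative).

-- ===== PORT A =====
-- loop body: on -1 append curr to groups and reset, else curr = curr + i + 1
def mgStepA (s : Int × List Int) (i : Int) : Int × List Int :=
  if i == -1 then (0, s.2 ++ [s.1]) else (s.1 + i + 1, s.2)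

def max_group (arr : List Int) : Int :=
  let s := arr.foldl mgStepA (0, [])
  let groups := s.2 ++ [s.1]     -- groups.append(curr)
  match PySem.List.max? groups (fun x => x) with   -- max(groups); groups is never empty
  | some m => m - 1
  | none => 0                    -- unreachable

-- ===== PORT B =====
-- termination helper for the port's recursion: arr.index(-1) is a valid position
theorem mg_index_lt {arr : List Int} {k : Nat}
    (h : PySem.List.index? arr (-1) = some k) : k < arr.length := by
  obtain ⟨hk, _, _⟩ := PySem.List.getElem_of_index?_eq_some h
  exact hk

-- Source B: if -1 in arr: k = arr.index(-1); return max(sum(arr[:k]) + k - 1, max_group(arr[k+1:]))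
--       else: return sum(arr) + len(arr) - 1
def max_group_alt (arr : List Int) : Int :=
  match h : PySem.List.index? arr (-1) with
  | some k =>
      max ((PySem.List.slice arr (some 0) (some (k : Int))).sum + (k : Int) - 1)
          (max_group_alt (PySem.List.slice arr (some ((k : Int) + 1)) none))
  | none => arr.sum + arr.length - 1
termination_by arr.length
decreasing_by
  have hk := mg_index_lt h
  have : ((k : Int) + 1) = ((k + 1 : Nat) : Int) := by push_cast; ring
  rw [this, PySem.List.slice_from_natCast, List.length_drop]
  omega

-- ===== PRECONDITION & SPEC =====
def Spec_max_group (arr : List Int) (out : Int) : Prop := out = max_group_alt arr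
instance (arr : List Int) (out : Int) : Decidable (Spec_max_group arr out) := by unfold Spec_max_group; infer_instance

-- ===== CLAIM (what is proved, stated in full; the proofs are below) =====
def Claim_equal_max_group : Prop := ∀ (arr : List Int), Dom_max_group arr → Spec_max_group arr (max_group arr)

-- ===== LEMMAS AND PROOFS =====

-- the maximum of a group list, as A's max() sees it (none for the empty list)
def mgMaxO (gs : List Int) : Option Int :=
  match gs with
  | [] => none
  | x :: t => some (t.foldl max x)

-- A's answer + 1, written over the final fold state
def mgVal (arr : List Int) : Int :=
  match mgMaxO (arr.foldl mgStepA (0, [])).2 with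
  | none => (arr.foldl mgStepA (0, [])).1
  | some b => max b (arr.foldl mgStepA (0, [])).1

theorem mgMax?_eq (gs : List Int) (c : Int) :
    PySem.List.max? (gs ++ [c]) (fun x => x) =
      some (match mgMaxO gs with | none => c | some b => max b c) := by
  cases gs with
  | nil => simp [PySem.List.max?_id_cons, mgMaxO]
  | cons x t =>
    simp [List.cons_append, PySem.List.max?_id_cons, mgMaxO, List.foldl_append]

-- a separator-free prefix just accumulates sum + length
theorem mg_foldl_nosep (g : List Int) (hg : (-1 : Int) ∉ g) :
    ∀ c gs, g.foldl mgStepA (c, gs) = (c + g.sum + g.length, gs) := by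
  induction g with
  | nil => intro c gs; simp [List.foldl_nil]
  | cons x t ih =>
    intro c gs
    have hx : x ≠ -1 := fun h => hg (h ▸ List.mem_cons_self)
    have ht : (-1 : Int) ∉ t := fun h => hg (List.mem_cons_of_mem _ h)
    rw [List.foldl_cons]
    simp only [mgStepA, beq_iff_eq, if_neg hx]
    rw [ih ht]
    simp only [List.sum_cons, List.length_cons]
    congr 1
    push_cast
    ring

-- already-collected groups are only prepended to
theorem mg_foldl_prefix (l : List Int) :
    ∀ c gs, l.foldl mgStepA (c, gs) =
      ((l.foldl mgStepA (c, [])).1, gs ++ (l.foldl mgStepA (c, [])).2) := by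
  induction l with
  | nil => intro c gs; simp
  | cons x t ih =>
    intro c gs
    by_cases h : x = -1
    · rw [List.foldl_cons, List.foldl_cons]
      simp only [mgStepA, beq_iff_eq, if_pos h]
      rw [ih 0 (gs ++ [c]), ih 0 ([] ++ [c])]
      simp
    · rw [List.foldl_cons, List.foldl_cons]
      simp only [mgStepA, beq_iff_eq, if_neg h]
      exact ih _ _
  
theorem foldl_max_max (t : List Int) (a b : Int) :
    t.foldl max (max a b) = max a (t.foldl max b) := by
  induction t generalizing b with
  | nil => rfl
  | cons x s ih => rw [List.foldl_cons, List.foldl_cons, max_assoc, ih]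

-- key identity: A's max-of-groups equals B's recursion shifted by one
theorem mgVal_cons_run (suf : List Int) (w : Int) :
    (match mgMaxO (w :: (suf.foldl mgStepA (0, [])).2) with
     | none => (suf.foldl mgStepA (0, [])).1
     | some b => max b (suf.foldl mgStepA (0, [])).1) = max w (mgVal suf) := by
  unfold mgVal
  rcases hgs : (suf.foldl mgStepA (0, [])).2 with _ | ⟨x, t⟩
  · simp [mgMaxO]
  · simp only [mgMaxO, List.foldl_cons]
    rw [foldl_max_max, max_assoc]

theorem mgVal_eq_alt (arr : List Int) : mgVal arr = max_group_alt arr + 1 := by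
  induction arr using max_group_alt.induct with
  | case2 arr h =>
    have hns : (-1 : Int) ∉ arr := (PySem.List.index?_eq_none_iff arr (-1)).1 h
    rw [max_group_alt, h]
    unfold mgVal
    rw [mg_foldl_nosep arr hns 0 []]
    simp [mgMaxO]
  | case1 arr k h ih =>
    obtain ⟨pre, suf, harr, hlen, hpre⟩ := (PySem.List.index?_eq_some_iff arr (-1) k).1 h
    -- identify B's slices
    have hcast : ((k : Int) + 1) = ((k + 1 : Nat) : Int) := by push_cast; ring
    have htake : PySem.List.slice arr (some 0) (some (k : Int)) = pre := by
      rw [PySem.List.slice_zero_start, PySem.List.slice_to_natCast, harr, ← hlen,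
        List.take_left]
    have hdrop : PySem.List.slice arr (some ((k : Int) + 1)) none = suf := by
      rw [hcast, PySem.List.slice_from_natCast, harr,
        show pre ++ (-1 : Int) :: suf = (pre ++ [-1]) ++ suf by simp,
        List.drop_left' (by simp [hlen])]
    -- unfold A's fold across pre, the separator, and suf
    have hrun : arr.foldl mgStepA (0, []) =
        ((suf.foldl mgStepA (0, [])).1,
         (0 + pre.sum + pre.length) :: (suf.foldl mgStepA (0, [])).2) := by
      rw [harr, List.foldl_append, mg_foldl_nosep pre hpre, List.foldl_cons]
      have hstep : mgStepA (0 + pre.sum + (pre.length : Int), []) (-1)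
          = (0, [0 + pre.sum + (pre.length : Int)]) := by simp [mgStepA]
      rw [hstep, mg_foldl_prefix suf 0 [0 + pre.sum + (pre.length : Int)]]
      simp
    have hval : mgVal arr = max (0 + pre.sum + (pre.length : Int)) (mgVal suf) := by
      unfold mgVal
      rw [hrun]
      exact mgVal_cons_run suf _
    rw [hval, max_group_alt]
    split
    · next k' heq =>
        rw [h] at heq
        cases heq
        rw [hdrop] at ih
        rw [htake, hdrop, ih, ← max_add_add_right]
        congr 1
        rw [hlen]; ring
    · next heq => rw [h] at heq; cases heq

-- ===== VERDICT (by name: the statement is the Claim_ definition above) =====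
theorem max_group_spec : Claim_equal_max_group := by
  intro arr _
  unfold Spec_max_group
  show (match PySem.List.max? ((arr.foldl mgStepA (0, [])).2 ++ [(arr.foldl mgStepA (0, [])).1]) (fun x => x) with
        | some m => m - 1 | none => 0) = max_group_alt arr
  rw [mgMax?_eq]
  show mgVal arr - 1 = max_group_alt arr
  rw [mgVal_eq_alt]
  ring
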